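-- pv_equiv track=rewrite | github.com/Guidan/AdventOfCode2022 | 03/03.py | findIDCard
-- ===== SOURCE A (Python) =====
-- def findIDCard(sacks: list[str]):
--     elf = 1
--     score = 0
--     temp_sack = ''
--     for index, sack in enumerate(sacks):
--         match elf:
--             case 1:
--                 temp_sack = ''.join(set(sack).intersection(sacks[index+1]))
--                 elf = elf + 1
--             case 2:
--                 common_letter = ''.join(set(temp_sack).intersection(sacks[index+1]))
--                 score = score + findScoreCard(common_letter)
--                 elf = elf + 1
--             case 3:
--                 elf = 1
--     return score
--
-- def findScoreCard(letter: str):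
--     score = 0
--     if letter.islower():
--         score = score + ord(letter)-96
--     else:
--         score = score + ord(letter)-38
--     return score
-- ===== SOURCE B (Python) =====
-- def findIDCard(sacks: list[str]):
--     score = 0
--     for g in range(0, len(sacks), 3):
--         c = next(ch for ch in sacks[g] if ch in sacks[g + 1] and ch in sacks[g + 2])
--         score += ord(c) - (96 if c.islower() else 38)
--     return score
-- ===== Notes on version B (the rewrite author's own statement) =====
-- stated objective: simpler
-- what changed: Replaced the 3-state elf machine with its temp_sack carry and findScoreCard helper by a single loop over group start indices range(0, len, 3) that scans the first sack for the first character contained in the other two and scores it inline.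
import Mathlib
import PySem

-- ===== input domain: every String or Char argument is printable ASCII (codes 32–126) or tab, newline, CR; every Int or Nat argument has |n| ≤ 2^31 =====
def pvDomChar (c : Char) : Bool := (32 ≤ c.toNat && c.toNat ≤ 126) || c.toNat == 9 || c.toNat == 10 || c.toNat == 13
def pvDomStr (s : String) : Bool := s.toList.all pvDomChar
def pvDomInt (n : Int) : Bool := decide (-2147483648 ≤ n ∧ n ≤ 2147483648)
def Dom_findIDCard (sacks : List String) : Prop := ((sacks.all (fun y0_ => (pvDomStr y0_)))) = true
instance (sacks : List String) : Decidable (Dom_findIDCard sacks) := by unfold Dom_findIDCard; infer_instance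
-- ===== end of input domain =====

-- B replaces A's 3-state elf machine (with its temp_sack carry and helper findScoreCard) by a
-- direct loop over group start indices that scans the first sack for the first char present in
-- the other two (objective: simpler).

-- ===== PORT A =====
-- findScoreCard(letter): inside Pre_ letter is a single char; on any other string Python's
-- ord() raises TypeError, so the `_ => 0` branch is never reached inside Pre_.
def findScoreCard (letter : String) : Int :=
  match letter.toList with
  | [c] =>
      if PySem.Chars.islower c then (0 : Int) + (c.toNat : Int) - 96
      else (0 : Int) + (c.toNat : Int) - 38
  | _ => 0

-- the for-loop of A as recursion over the remaining sacks, carrying (index, elf, score, temp_sack).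
-- sacks[index+1] is ported as List.getD with "" — Python raises IndexError out of range, which
-- Pre_ excludes. temp_sack is kept as the intersection Set (a List Char): Python joins it into a
-- string in hash order and re-builds the set from it; only its CONTENT ever matters to the result
-- claimed (inside Pre_ the final intersection is a singleton), so this is exact there.
def goA (full : List String) : List String → Nat → Int → Int → List Char → Int
  | [], _, _, score, _ => score
  | sack :: rest, index, elf, score, temp =>
    if elf = 1 then
      goA full rest (index + 1) (elf + 1) score
        (PySem.Set.inter (PySem.Set.ofList sack.toList) ((full.getD (index + 1) "").toList))
    else if elf = 2 then
      goA full rest (index + 1) (elf + 1)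
        (score + findScoreCard (String.ofList
          (PySem.Set.inter (PySem.Set.ofList temp) ((full.getD (index + 1) "").toList)))) temp
    else if elf = 3 then
      goA full rest (index + 1) 1 score temp
    else
      goA full rest (index + 1) elf score temp

def findIDCard (sacks : List String) : Int := goA sacks sacks 0 1 0 []

-- ===== PORT B =====
-- the body of B's for-loop over `g in range(0, len(sacks), 3)`. `ch in sacks[g+1]` is a
-- substring test; for a single char it is exactly List.contains on the code points.
-- Indexing is PySem.List.pyGet? with "" where Python would raise IndexError, and the `none`
-- branch of find? is where Python's next() raises StopIteration — both excluded by Pre_.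
def goB (sacks : List String) : List Int → Int → Int
  | [], score => score
  | g :: gs, score =>
    let s0 := (PySem.List.pyGet? sacks g).getD ""
    let s1 := (PySem.List.pyGet? sacks (g + 1)).getD ""
    let s2 := (PySem.List.pyGet? sacks (g + 2)).getD ""
    match s0.toList.find? (fun ch => s1.toList.contains ch && s2.toList.contains ch) with
    | some c =>
        goB sacks gs (score + ((c.toNat : Int) - if PySem.Chars.islower c then 96 else 38))
    | none => goB sacks gs score

def findIDCard_alt (sacks : List String) : Int :=
  goB sacks (PySem.List.pyRange 0 (sacks.length : Int) 3) 0

-- ===== PRECONDITION & SPEC =====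
-- the distinct chars common to the three sacks of one group, in first-occurrence order of s0
def common3 (s0 s1 s2 : String) : List Char :=
  (PySem.Set.ofList s0.toList).filter (fun ch => s1.toList.contains ch && s2.toList.contains ch)

def goodGroups : List String → Bool
  | [] => true
  | s0 :: s1 :: s2 :: r => (common3 s0 s1 s2).length == 1 && goodGroups r
  | _ => false

-- Pre_ excludes exactly the inputs on which the Python A raises: a length not a multiple of 3
-- (IndexError on sacks[index+1]) and any group of three whose common-character set is not a
-- singleton (TypeError from ord() on a string of length ≠ 1). A returns on every other input.
def Pre_findIDCard (sacks : List String) : Prop := goodGroups sacks = true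
instance (sacks : List String) : Decidable (Pre_findIDCard sacks) := by
  unfold Pre_findIDCard; infer_instance

def pvWitness_findIDCard : List String := ["abc", "cde", "fgc", "PQ", "QR", "SQ"]

def Spec_findIDCard (sacks : List String) (out : Int) : Prop := out = findIDCard_alt sacks
instance (sacks : List String) (out : Int) : Decidable (Spec_findIDCard sacks out) := by unfold Spec_findIDCard; infer_instance

-- ===== CLAIM (what is proved, stated in full; the proofs are below) =====
def Claim_equal_findIDCard : Prop := ∀ (sacks : List String), Dom_findIDCard sacks → Pre_findIDCard sacks → Spec_findIDCard sacks (findIDCard sacks)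

-- ===== LEMMAS AND PROOFS =====

-- range(a, b, 3) peels its first element while a < b
lemma pyRange3_cons (a b : Int) (h : a < b) :
    PySem.List.pyRange a b 3 = a :: PySem.List.pyRange (a + 3) b 3 := by
  rw [PySem.List.pyRange_of_pos a b (by norm_num),
      PySem.List.pyRange_of_pos (a + 3) b (by norm_num)]
  have h3 : ((b - a + 3 - 1) / 3).toNat =
      (if a + 3 < b then ((b - (a + 3) + 3 - 1) / 3).toNat else 0) + 1 := by
    split <;> omega
  rw [if_pos h, h3, List.range_succ_eq_map, List.map_cons, List.map_map]
  congr 1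
  · simp
  · apply List.map_congr_left
    intro k _
    simp only [Function.comp_apply]
    push_cast
    ring

-- `next(ch for ch in l if p ch)` finds the head of the deduplicated filtered list
lemma find?_eq_of_filter_ofList {p : Char → Bool} {l : List Char} {c : Char}
    (h : (PySem.Set.ofList l).filter p = [c]) : l.find? p = some c := by
  induction l with
  | nil => simp [PySem.Set.ofList] at h
  | cons x xs ih =>
    rw [PySem.Set.ofList_cons] at h
    by_cases hx : p x = true
    · simp [hx] at h
      obtain ⟨rfl, -⟩ := h
      simp [hx]
    · have hx' : p x = false := by simp at hx; exact hx
      rw [List.filter_cons, hx'] at h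
      have hdis : ((PySem.Set.ofList xs).discard x).filter p
          = (PySem.Set.ofList xs).filter p := by
        simp only [PySem.Set.discard, List.filter_filter]
        apply List.filter_congr
        intro y _
        by_cases hy : y = x
        · subst hy; simp [hx']
        · simp [hy]
      rw [hdis] at h
      simp [hx', ih h]

lemma drop_getD (full : List String) (idx j : Nat) (h : idx + j < full.length) :
    full.getD (idx + j) "" = (full.drop idx).getD j "" := by
  have h2 : j < (full.drop idx).length := by simp; omega
  rw [List.getD_eq_getElem _ _ h, List.getD_eq_getElem _ _ h2]
  simp

-- the main invariant: from an aligned index, A's elf machine equals B's group loop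
lemma key (full : List String) :
    ∀ (n : Nat) (rest : List String) (idx : Nat) (score : Int) (tempL : List Char),
    rest.length = n → rest = full.drop idx → goodGroups rest = true →
    goA full rest idx 1 score tempL
      = goB full (PySem.List.pyRange (idx : Int) (full.length : Int) 3) score := by
  intro n
  induction n using Nat.strong_induction_on with
  | _ n ih =>
  intro rest idx score tempL hn hdrop hgood
  rcases rest with _ | ⟨s0, _ | ⟨s1, _ | ⟨s2, r⟩⟩⟩
  · -- no sacks left: the index range is exhausted too
    have hlen : full.length ≤ idx := by
      by_contra hlt
      have hl : ([] : List String).length = full.length - idx := by rw [hdrop]; simp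
      simp at hl
      omega
    have hnil : PySem.List.pyRange (idx : Int) (full.length : Int) 3 = [] := by
      rw [PySem.List.pyRange_of_pos _ _ (by norm_num)]
      rw [if_neg (by exact_mod_cast Nat.not_lt.mpr hlen)]
      simp
    rw [hnil]
    rfl
  · simp [goodGroups] at hgood
  · simp [goodGroups] at hgood
  · simp only [goodGroups, Bool.and_eq_true, beq_iff_eq] at hgood
    obtain ⟨hlen1, hgoodr⟩ := hgood
    -- the index is in range and the three sacks are full[idx], full[idx+1], full[idx+2]
    have hlt : idx + 2 < full.length := by
      have := congrArg List.length hdrop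
      simp at this
      omega
    have hs1 : full.getD (idx + 1) "" = s1 := by
      rw [drop_getD full idx 1 (by omega), ← hdrop]; rfl
    have hs2 : full.getD (idx + 2) "" = s2 := by
      rw [drop_getD full idx 2 (by omega), ← hdrop]; rfl
    have hs0 : full.getD idx "" = s0 := by
      have h0 := drop_getD full idx 0 (by omega)
      rw [← hdrop] at h0
      simpa using h0
    -- unfold three steps of A
    have hA : goA full (s0 :: s1 :: s2 :: r) idx 1 score tempL
        = goA full r (idx + 3) 1
            (score + findScoreCard (String.ofList
              (PySem.Set.inter
                (PySem.Set.ofList (PySem.Set.inter (PySem.Set.ofList s0.toList) s1.toList))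
                s2.toList))) (PySem.Set.inter (PySem.Set.ofList s0.toList) s1.toList) := by
      simp only [goA, hs1, hs2]
      norm_num
    -- the string fed to findScoreCard is exactly common3 s0 s1 s2
    have hT : PySem.Set.inter
        (PySem.Set.ofList (PySem.Set.inter (PySem.Set.ofList s0.toList) s1.toList)) s2.toList
        = common3 s0 s1 s2 := by
      rw [PySem.Set.ofList_eq_self_of_nodup _
        (PySem.Set.nodup_inter _ _ (PySem.Set.nodup_ofList s0.toList))]
      simp only [PySem.Set.inter, List.filter_filter, common3]
      apply List.filter_congr
      intro y _
      simp [PySem.Set.contains, Bool.and_comm]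
    -- the singleton common char
    obtain ⟨c, hc⟩ : ∃ c, common3 s0 s1 s2 = [c] := by
      match hx : common3 s0 s1 s2 with
      | [c] => exact ⟨c, rfl⟩
      | [] => rw [hx] at hlen1; simp at hlen1
      | _ :: _ :: _ => rw [hx] at hlen1; simp at hlen1
    -- the three indexed reads of B
    have hget0 : (PySem.List.pyGet? full (idx : Int)).getD "" = s0 := by
      rw [PySem.List.pyGet?_natCast full idx,
          List.getElem?_eq_getElem (show idx < full.length by omega), Option.getD_some,
          ← hs0, List.getD_eq_getElem _ _ (show idx < full.length by omega)]
    have hget1 : (PySem.List.pyGet? full ((idx : Int) + 1)).getD "" = s1 := by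
      rw [show ((idx : Int) + 1) = ((idx + 1 : Nat) : Int) by push_cast; ring,
          PySem.List.pyGet?_natCast full (idx + 1),
          List.getElem?_eq_getElem (show idx + 1 < full.length by omega), Option.getD_some,
          ← hs1, List.getD_eq_getElem _ _ (show idx + 1 < full.length by omega)]
    have hget2 : (PySem.List.pyGet? full ((idx : Int) + 2)).getD "" = s2 := by
      rw [show ((idx : Int) + 2) = ((idx + 2 : Nat) : Int) by push_cast; ring,
          PySem.List.pyGet?_natCast full (idx + 2),
          List.getElem?_eq_getElem (show idx + 2 < full.length by omega), Option.getD_some,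
          ← hs2, List.getD_eq_getElem _ _ (show idx + 2 < full.length by omega)]
    have hfind : s0.toList.find?
        (fun ch => s1.toList.contains ch && s2.toList.contains ch) = some c :=
      find?_eq_of_filter_ofList (by rw [← common3, hc])
    -- unfold one step of B
    have hB : goB full (PySem.List.pyRange (idx : Int) (full.length : Int) 3) score
        = goB full (PySem.List.pyRange ((idx : Int) + 3) (full.length : Int) 3)
            (score + ((c.toNat : Int) - if PySem.Chars.islower c then 96 else 38)) := by
      rw [pyRange3_cons _ _ (by exact_mod_cast (show idx < full.length by omega))]
      simp only [goB, hget0, hget1, hget2, hfind]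
    -- the two added scores coincide
    have hscore : findScoreCard (String.ofList (common3 s0 s1 s2))
        = (c.toNat : Int) - if PySem.Chars.islower c then 96 else 38 := by
      rw [hc]
      simp only [findScoreCard, String.toList_ofList]
      split <;> omega
    rw [hA, hT, hscore, hB]
    have hdrop3 : r = full.drop (idx + 3) := by
      have hd : full.drop (idx + 3) = (full.drop idx).drop 3 := by
        rw [List.drop_drop]
      rw [hd, ← hdrop]
      rfl
    have hIH := ih r.length (by simp at hn; omega) r (idx + 3)
      (score + ((c.toNat : Int) - if PySem.Chars.islower c then 96 else 38))
      (PySem.Set.inter (PySem.Set.ofList s0.toList) s1.toList) rfl hdrop3 hgoodr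
    rw [hIH]
    norm_num

-- ===== VERDICT (by name: the statement is the Claim_ definition above) =====
theorem findIDCard_spec : Claim_equal_findIDCard := by
  intro sacks _ hpre
  unfold Spec_findIDCard findIDCard findIDCard_alt
  exact key sacks sacks.length sacks 0 0 [] rfl (by simp) hpre
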